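-- pv_equiv track=rewrite | github.com/adi271001/gfg-weekly-solutions | Week-88/Mex-Array.py | mexArray
-- ===== SOURCE A (Python) =====
-- def mexArray(n, arr):
--     # code here
--     arr.sort(reverse=True)
--     mp=dict()
--     ans=[]
--     num=0
--     for i in range(n):
--         mp[arr[i]]=1
--         while(True):
--             if (num not in mp):
--                 ans.append(num)
--                 break
--             else:
--                 num+=1
--     return ans
-- ===== SOURCE B (Python) =====
-- def mexArray(n, arr):
--     # Backward-deletion strategy: sort descending in place (as the output order
--     # demands), count the first n values once and find the MEX of the whole
--     # prefix; then walk the prefix backwards, recording the current MEX and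
--     # removing one value at a time -- removing the last copy of a value below
--     # the current MEX drops the MEX exactly to that value.
--     arr.sort(reverse=True)
--     prefix = arr[:max(n, 0)]
--     cnt = {}
--     for v in prefix:
--         cnt[v] = cnt.get(v, 0) + 1
--     mex = 0
--     while cnt.get(mex, 0) > 0:
--         mex += 1
--     out = []
--     for v in reversed(prefix):
--         out.append(mex)
--         cnt[v] -= 1
--         if cnt[v] == 0 and 0 <= v < mex:
--             mex = v
--     out.reverse()
--     return out
-- ===== Notes on version B (the rewrite author's own statement) =====
-- stated objective: alternative
-- what changed: B replaces A's forward pass with its carried 'while num in mp' pointer by a backward-deletion algorithm: it counts the whole n-prefix once, computes the full prefix's MEX with a single scan, then walks the prefix from the end recording the current MEX and deleting one value per step (the MEX drops to v exactly when the last copy of a v below it is removed), finally reversing the collected answers.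
import Mathlib
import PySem

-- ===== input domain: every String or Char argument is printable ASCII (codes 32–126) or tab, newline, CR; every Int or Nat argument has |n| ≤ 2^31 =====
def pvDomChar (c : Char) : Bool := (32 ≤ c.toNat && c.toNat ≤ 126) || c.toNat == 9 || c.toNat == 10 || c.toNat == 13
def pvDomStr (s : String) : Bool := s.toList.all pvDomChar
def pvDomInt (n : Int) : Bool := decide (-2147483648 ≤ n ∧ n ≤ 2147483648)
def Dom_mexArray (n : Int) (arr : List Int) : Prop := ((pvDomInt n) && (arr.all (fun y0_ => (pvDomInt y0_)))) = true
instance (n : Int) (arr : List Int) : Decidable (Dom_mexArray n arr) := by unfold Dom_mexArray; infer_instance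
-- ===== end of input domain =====

-- B replaces A's forward pass with a carried MEX pointer by a backward-deletion walk:
-- count the prefix once, compute the full prefix's MEX, then delete one value per step
-- going backwards, dropping the MEX to v when the last copy of a v below it is removed
-- (objective: alternative). Both A and B sort arr in place (arr.sort(reverse=True));
-- the equivalence proved here is about the RETURN value only.

-- ===== PORT A =====
-- the inner 'while True: if num not in mp: break else num += 1' loop; fuel makes it total
-- (fuel = mp.size + 1 always suffices, see mexFindA_mex below)
def mexFindA (mp : PySem.Dict Int Int) : Int → Nat → Int
  | num, 0 => num
  | num, Nat.succ fuel => if mp.contains num then mexFindA mp (num + 1) fuel else num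

def mexArray (n : Int) (arr : List Int) : List Int :=
  let sortedArr := PySem.List.sorted arr (fun x => x) true
  ((PySem.List.pyRange 0 n 1).foldl
    (fun (s : PySem.Dict Int Int × List Int × Int) i =>
      let mp := s.1.insert (PySem.List.pyGetD sortedArr i 0) 1
      let num := mexFindA mp s.2.2 (mp.size + 1)
      (mp, s.2.1 ++ [num], num))
    (PySem.Dict.empty, [], 0)).2.1

-- ===== PORT B =====
-- the 'while cnt.get(mex, 0) > 0: mex += 1' initial scan; fuel makes it total
-- (fuel = cnt.size + 1 always suffices, see mexInit_spec below)
def mexInit (cnt : PySem.Dict Int Int) : Int → Nat → Int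
  | m, 0 => m
  | m, Nat.succ fuel => if 0 < cnt.getD m 0 then mexInit cnt (m + 1) fuel else m

def mexArray_alt (n : Int) (arr : List Int) : List Int :=
  let sortedArr := PySem.List.sorted arr (fun x => x) true
  let pref := PySem.List.slice sortedArr none (some (max n 0))
  let cnt := pref.foldl (fun c v => c.insert v (c.getD v 0 + 1)) PySem.Dict.empty
  let mex := mexInit cnt 0 (cnt.size + 1)
  let fin := pref.reverse.foldl
    (fun (s : PySem.Dict Int Int × Int × List Int) v =>
      let out := s.2.2 ++ [s.2.1]
      let c := s.1.insert v (s.1.getD v 0 - 1)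
      let m := if c.getD v 0 = 0 ∧ 0 ≤ v ∧ v < s.2.1 then v else s.2.1
      (c, m, out))
    (cnt, mex, [])
  fin.2.2.reverse

-- ===== PRECONDITION & SPEC =====
-- Pre_ excludes exactly the inputs where Python A raises IndexError: n greater than len(arr)
def Pre_mexArray (n : Int) (arr : List Int) : Prop := n ≤ (arr.length : Int)
instance (n : Int) (arr : List Int) : Decidable (Pre_mexArray n arr) := by unfold Pre_mexArray; infer_instance
def pvWitness_mexArray : Int × List Int := (3, [2, 0, 2])

def Spec_mexArray (n : Int) (arr : List Int) (out : List Int) : Prop := out = mexArray_alt n arr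
instance (n : Int) (arr : List Int) (out : List Int) : Decidable (Spec_mexArray n arr out) := by unfold Spec_mexArray; infer_instance

-- ===== CLAIM (what is proved, stated in full; the proofs are below) =====
def Claim_equal_mexArray : Prop := ∀ (n : Int) (arr : List Int), Dom_mexArray n arr → Pre_mexArray n arr → Spec_mexArray n arr (mexArray n arr)

-- ===== LEMMAS AND PROOFS =====

-- 'm is the MEX of P'
def pvMexSpec (P : List Int) (m : Int) : Prop :=
  0 ≤ m ∧ m ∉ P ∧ ∀ k, 0 ≤ k → k < m → k ∈ P

theorem pvMex_unique {P : List Int} {r s : Int}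
    (hr : pvMexSpec P r) (hs : pvMexSpec P s) : r = s := by
  rcases lt_trichotomy r s with h | h | h
  · exact absurd (hs.2.2 r hr.1 h) hr.2.1
  · exact h
  · exact absurd (hr.2.2 s hs.1 h) hs.2.1

-- generic upward scan; both while-loops are instances of it
def pvScan (P : Int → Bool) : Int → Nat → Int
  | m, 0 => m
  | m, Nat.succ fuel => if P m then pvScan P (m + 1) fuel else m

-- if some non-P point lies within fuel of m, the scan returns the least non-P point ≥ m
theorem pvScan_spec (P : Int → Bool) (fuel : Nat) (m : Int)
    (h : ∃ r, m ≤ r ∧ r < m + fuel ∧ P r = false) :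
    P (pvScan P m fuel) = false ∧ m ≤ pvScan P m fuel ∧
      ∀ k, m ≤ k → k < pvScan P m fuel → P k = true := by
  induction fuel generalizing m with
  | zero =>
    obtain ⟨r, h1, h2, _⟩ := h
    omega
  | succ f ih =>
    by_cases hP : P m = true
    · have h' : ∃ r, m + 1 ≤ r ∧ r < (m + 1) + f ∧ P r = false := by
        obtain ⟨r, h1, h2, h3⟩ := h
        have hmr : m ≠ r := fun he => by rw [← he, hP] at h3; cases h3
        exact ⟨r, by omega, by omega, h3⟩
      have hrec := ih (m + 1) h'
      have hrec1 := hrec.2.1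
      simp only [pvScan, hP, if_true]
      refine ⟨hrec.1, by omega, fun k hk1 hk2 => ?_⟩
      rcases eq_or_lt_of_le hk1 with hk | hk
      · rw [← hk]; exact hP
      · exact hrec.2.2 k (by omega) hk2
    · simp only [Bool.not_eq_true] at hP
      have hred : pvScan P m (Nat.succ f) = m := by
        unfold pvScan; rw [hP]; simp
      rw [hred]
      exact ⟨hP, le_refl m, fun k h1 h2 => by omega⟩

-- pigeonhole: among L.length + 1 consecutive integers one is missing from L
theorem pvExists_not_mem (L : List Int) (m : Int) :
    ∃ r, m ≤ r ∧ r < m + ((L.length : Int) + 1) ∧ r ∉ L := by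
  by_contra hc
  push Not at hc
  have hsub : PySem.List.pyRange m (m + ((L.length : Int) + 1)) 1 ⊆ L := by
    intro x hx
    rw [PySem.List.mem_pyRange_one] at hx
    exact hc x hx.1 hx.2
  have hlen := (List.subperm_of_subset (PySem.List.nodup_pyRange_one _ _) hsub).length_le
  rw [PySem.List.length_pyRange_one] at hlen
  omega

-- the canonical MEX value, used only by the proofs to name both programs' results
def pvMexOf (P : List Int) : Int := pvScan (fun x => decide (x ∈ P)) 0 (P.length + 1)

theorem pvMexOf_spec (P : List Int) : pvMexSpec P (pvMexOf P) := by
  have h := pvScan_spec (fun x => decide (x ∈ P)) (P.length + 1) 0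
    (by
      obtain ⟨r, h1, h2, h3⟩ := pvExists_not_mem P 0
      exact ⟨r, h1, by push_cast; omega, by simpa using h3⟩)
  unfold pvMexOf
  exact ⟨h.2.1, by simpa using h.1, fun k h1 h2 => by simpa using h.2.2 k h1 h2⟩

theorem pvDict_contains_iff (mp : PySem.Dict Int Int) (x : Int) :
    mp.contains x = true ↔ x ∈ mp.keys := by
  rw [PySem.Dict.contains_eq_decide_mem_keys]; simp

-- ===== A side =====

theorem mexFindA_eq_scan (mp : PySem.Dict Int Int) (m : Int) (fuel : Nat) :
    mexFindA mp m fuel = pvScan (fun x => mp.contains x) m fuel := by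
  induction fuel generalizing m with
  | zero => rfl
  | succ f ih => simp only [mexFindA, pvScan, ih]

-- A's inner loop with fuel mp.size + 1 returns the least non-key ≥ num
theorem mexFindA_mex (mp : PySem.Dict Int Int) (m : Int) :
    mp.contains (mexFindA mp m (mp.size + 1)) = false ∧ m ≤ mexFindA mp m (mp.size + 1) ∧
      ∀ k, m ≤ k → k < mexFindA mp m (mp.size + 1) → mp.contains k = true := by
  have hsz : mp.size = mp.keys.length := by
    simp [PySem.Dict.size, PySem.Dict.keys]
  have hex : ∃ r, m ≤ r ∧ r < m + ((mp.size : Nat) : Int) + 1 ∧ (mp.contains r) = false := by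
    obtain ⟨r, h1, h2, h3⟩ := pvExists_not_mem mp.keys m
    refine ⟨r, h1, by rw [hsz]; omega, ?_⟩
    rcases Bool.eq_false_or_eq_true (mp.contains r) with hb | hb
    · exact absurd ((pvDict_contains_iff _ _).mp hb) h3
    · exact hb
  have h := pvScan_spec (fun x => mp.contains x) (mp.size + 1) m
    (by obtain ⟨r, h1, h2, h3⟩ := hex; exact ⟨r, h1, by push_cast; omega, h3⟩)
  rw [← mexFindA_eq_scan] at h
  exact h

-- A's loop invariant: the dict's keys are exactly the inserted prefix, and
-- every nonnegative integer below num is a key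
def pvInvA (V : List Int) (mp : PySem.Dict Int Int) (num : Int) : Prop :=
  (∀ x, mp.contains x = true ↔ x ∈ V) ∧ 0 ≤ num ∧ (∀ k, 0 ≤ k → k < num → k ∈ V)

-- A's remaining fold over indices [a, n) appends exactly the per-prefix MEX values
theorem pvFoldA (xs : List Int) (n : Int) (hn : n ≤ (xs.length : Int)) :
    ∀ (fuel : Nat) (a : Int), (n - a).toNat ≤ fuel → 0 ≤ a →
    ∀ (mp : PySem.Dict Int Int) (ans : List Int) (num : Int),
      pvInvA (xs.take a.toNat) mp num →
      ((PySem.List.pyRange a n 1).foldl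
        (fun (s : PySem.Dict Int Int × List Int × Int) i =>
          let mp := s.1.insert (PySem.List.pyGetD xs i 0) 1
          let num := mexFindA mp s.2.2 (mp.size + 1)
          (mp, s.2.1 ++ [num], num))
        (mp, ans, num)).2.1
      = ans ++ (PySem.List.pyRange a n 1).map
          (fun i => pvMexOf (xs.take (i + 1).toNat)) := by
  intro fuel
  induction fuel with
  | zero =>
    intro a hf ha mp ans num _
    rw [PySem.List.pyRange_one_eq_nil (by omega)]
    simp
  | succ f ih =>
    intro a hf ha mp ans num hInv
    by_cases hab : a < n
    · rw [PySem.List.pyRange_one_cons hab]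
      have halen : a.toNat < xs.length := by omega
      have hv : PySem.List.pyGetD xs a 0 = xs[a.toNat] :=
        PySem.List.pyGetD_eq_getElem xs 0 ha (by omega)
      set v := PySem.List.pyGetD xs a 0 with hvdef
      set mp' := mp.insert v 1 with hmp'
      set num' := mexFindA mp' num (mp'.size + 1) with hnum'
      -- the new prefix of inserted values
      have htake : xs.take (a + 1).toNat = xs.take a.toNat ++ [v] := by
        have h1 : (a + 1).toNat = a.toNat + 1 := by omega
        rw [h1, List.take_add_one, hv]
        simp [halen]
      -- membership agreement after the insertion
      have hcont' : ∀ x, mp'.contains x = true ↔ x ∈ xs.take (a + 1).toNat := by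
        intro x
        rw [htake, hmp', PySem.Dict.contains_insert]
        simp only [Bool.or_eq_true, beq_iff_eq, List.mem_append, List.mem_singleton]
        rw [hInv.1 x]
        tauto
      have hA := mexFindA_mex mp' num
      rw [← hnum'] at hA
      obtain ⟨hA1, hA2, hA3⟩ := hA
      have hnum0 : 0 ≤ num := hInv.2.1
      -- num' is the MEX of the new prefix
      have hmex : num' = pvMexOf (xs.take (a + 1).toNat) := by
        refine pvMex_unique (P := xs.take (a + 1).toNat) ⟨by omega, ?_, ?_⟩ (pvMexOf_spec _)
        · intro hmem
          have := (hcont' num').mpr hmem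
          rw [hA1] at this
          cases this
        · intro k h1 h2
          by_cases hk : k < num
          · rw [htake]
            exact List.mem_append_left _ (hInv.2.2 k h1 hk)
          · exact (hcont' k).mp (hA3 k (by omega) h2)
      -- new invariant, and the inductive step
      have hInv' : pvInvA (xs.take (a + 1).toNat) mp' num' := by
        refine ⟨hcont', by omega, fun k h1 h2 => ?_⟩
        by_cases hk : k < num
        · rw [htake]; exact List.mem_append_left _ (hInv.2.2 k h1 hk)
        · exact (hcont' k).mp (hA3 k (by omega) h2)
      have hrec := ih (a + 1) (by omega) (by omega) mp' (ans ++ [num']) num' hInv'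
      simp only [List.foldl_cons, List.map_cons]
      rw [← hvdef, ← hmp']
      simp only [← hnum']
      rw [hrec, hmex]
      simp
    · rw [PySem.List.pyRange_one_eq_nil (by omega)]
      simp

-- ===== B side =====

theorem mexInit_eq_scan (cnt : PySem.Dict Int Int) (m : Int) (fuel : Nat) :
    mexInit cnt m fuel = pvScan (fun x => decide (0 < cnt.getD x 0)) m fuel := by
  induction fuel generalizing m with
  | zero => rfl
  | succ f ih => simp only [mexInit, pvScan, ih, decide_eq_true_eq]

-- B's initial scan over the counter of P computes the MEX of P
theorem mexInit_spec (P : List Int) :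
    pvMexSpec P (mexInit (PySem.Dict.counter P) 0 ((PySem.Dict.counter P).size + 1)) := by
  set cnt := PySem.Dict.counter P with hcnt
  have hsz : cnt.size = cnt.keys.length := by
    simp [PySem.Dict.size, PySem.Dict.keys]
  have hgd : ∀ x, cnt.getD x 0 = (P.count x : Int) := fun x => by
    rw [hcnt, PySem.Dict.getD_counter]
  have hex : ∃ r, 0 ≤ r ∧ r < 0 + ((cnt.size + 1 : Nat) : Int) ∧
      decide (0 < cnt.getD r 0) = false := by
    obtain ⟨r, h1, h2, h3⟩ := pvExists_not_mem cnt.keys 0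
    refine ⟨r, h1, by rw [hsz] at *; push_cast; omega, ?_⟩
    have hcf : cnt.contains r = false := by
      rcases Bool.eq_false_or_eq_true (cnt.contains r) with hb | hb
      · exact absurd ((pvDict_contains_iff _ _).mp hb) h3
      · exact hb
    rw [PySem.Dict.getD_of_not_contains cnt 0 hcf]
    simp
  have h := pvScan_spec (fun x => decide (0 < cnt.getD x 0)) (cnt.size + 1) 0 hex
  rw [← mexInit_eq_scan] at h
  refine ⟨h.2.1, ?_, fun k h1 h2 => ?_⟩
  · intro hmem
    have h0 := h.1
    simp only [hgd, decide_eq_false_iff_not, not_lt] at h0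
    have : P.count (mexInit cnt 0 (cnt.size + 1)) = 0 := by exact_mod_cast le_antisymm h0 (by positivity)
    exact absurd hmem (List.count_eq_zero.mp this)
  · have hk := h.2.2 k h1 h2
    simp only [hgd, decide_eq_true_eq] at hk
    have : 0 < P.count k := by exact_mod_cast hk
    exact List.count_pos_iff.mp this

-- B's backward fold emits the MEX of every prefix, longest first
theorem pvFoldB (P : List Int) :
    ∀ (cnt : PySem.Dict Int Int) (mex : Int) (out : List Int),
      (∀ x, cnt.getD x 0 = (P.count x : Int)) → pvMexSpec P mex →
      ((P.reverse.foldl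
          (fun (s : PySem.Dict Int Int × Int × List Int) v =>
            let out := s.2.2 ++ [s.2.1]
            let c := s.1.insert v (s.1.getD v 0 - 1)
            let m := if c.getD v 0 = 0 ∧ 0 ≤ v ∧ v < s.2.1 then v else s.2.1
            (c, m, out))
          (cnt, mex, out)).2.2)
        = out ++ (List.range P.length).map (fun j => pvMexOf (P.take (P.length - j))) := by
  induction P using List.reverseRecOn with
  | nil => intro cnt mex out _ _; simp
  | append_singleton Q v ih =>
    intro cnt mex out hc hm
    have hrev : (Q ++ [v]).reverse = v :: Q.reverse := by simp
    rw [hrev]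
    simp only [List.foldl_cons]
    set cnt' := cnt.insert v (cnt.getD v 0 - 1) with hcnt'
    have hcountv : (Q ++ [v]).count v = Q.count v + 1 := by
      simp [List.count_append]
    have hcountne : ∀ x, x ≠ v → (Q ++ [v]).count x = Q.count x := by
      intro x hx
      simp [List.count_append, Ne.symm hx]
    -- counts now describe the shorter prefix Q
    have hc' : ∀ x, cnt'.getD x 0 = (Q.count x : Int) := by
      intro x
      rw [hcnt', PySem.Dict.getD_insert]
      by_cases hx : x = v
      · subst hx; rw [if_pos rfl, hc x, hcountv]; push_cast; ring
      · rw [if_neg hx, hc x, hcountne x hx]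
    -- the updated mex is the MEX of Q
    have hm' : pvMexSpec Q (if cnt'.getD v 0 = 0 ∧ 0 ≤ v ∧ v < mex then v else mex) := by
      have hmemQV : ∀ x, x ∈ Q ++ [v] ↔ x ∈ Q ∨ x = v := by
        intro x; simp
      have hgdv : cnt'.getD v 0 = (Q.count v : Int) := hc' v
      split_ifs with hcond
      · obtain ⟨hz, hv0, hvm⟩ := hcond
        rw [hgdv] at hz
        have hvQ : v ∉ Q := List.count_eq_zero.mp (by exact_mod_cast hz)
        refine ⟨hv0, hvQ, fun k h1 h2 => ?_⟩
        have := hm.2.2 k h1 (by omega)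
        rcases (hmemQV k).mp this with h | h
        · exact h
        · omega
      · refine ⟨hm.1, fun hmem => hm.2.1 ((hmemQV mex).mpr (Or.inl hmem)), fun k h1 h2 => ?_⟩
        rcases (hmemQV k).mp (hm.2.2 k h1 h2) with h | h
        · exact h
        · subst h
          by_cases hz : cnt'.getD k 0 = 0
          · exact absurd ⟨hz, h1, h2⟩ hcond
          · rw [hc' k] at hz
            exact List.count_pos_iff.mp (by omega)
    have hrec := ih cnt' _ (out ++ [mex]) hc' hm'
    rw [hrec]
    -- the emitted value is the MEX of Q ++ [v]
    have hmex : mex = pvMexOf (Q ++ [v]) := pvMex_unique hm (pvMexOf_spec _)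
    -- reshape the right-hand side
    have hlen : (Q ++ [v]).length = Q.length + 1 := by simp
    rw [hlen, List.range_succ_eq_map, List.map_cons, List.map_map]
    have h0 : pvMexOf ((Q ++ [v]).take (Q.length + 1 - 0)) = pvMexOf (Q ++ [v]) := by
      rw [Nat.sub_zero, ← hlen, List.take_length]
    have htail : ∀ j ∈ List.range Q.length,
        ((fun j => pvMexOf ((Q ++ [v]).take (Q.length + 1 - j))) ∘ Nat.succ) j
          = pvMexOf (Q.take (Q.length - j)) := by
      intro j _
      have h1 : Q.length + 1 - Nat.succ j = Q.length - j := by omega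
      simp only [Function.comp_apply, h1]
      rw [List.take_append_of_le_length (by omega)]
    rw [List.map_congr_left htail, h0, ← hmex]
    simp
    
-- ===== final assembly =====
theorem mexArray_spec : Claim_equal_mexArray := by
  intro n arr _ hpre
  unfold Spec_mexArray mexArray mexArray_alt
  simp only []
  set xs := PySem.List.sorted arr (fun x => x) true with hxs
  have hlen : n ≤ (xs.length : Int) := by
    rw [hxs, PySem.List.length_sorted]; exact hpre
  have hnlen : n.toNat ≤ xs.length := by omega
  -- A's output, elementwise
  have hA := pvFoldA xs n hlen (n - 0).toNat 0 (le_refl _) (le_refl 0)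
    PySem.Dict.empty [] 0
    (by
      refine ⟨fun x => ?_, le_refl 0, fun k h1 h2 => by omega⟩
      simp [PySem.Dict.contains_empty])
  rw [hA]
  -- B's prefix is take n.toNat
  have hmax : (max n 0).toNat = n.toNat := by omega
  rw [PySem.List.slice_to xs (by omega), hmax]
  set P := xs.take n.toNat with hP
  have hPlen : P.length = n.toNat := by
    rw [hP, List.length_take]; omega
  rw [PySem.Dict.foldl_insert_getD_add_one_eq_counter]
  have hB := pvFoldB P (PySem.Dict.counter P)
    (mexInit (PySem.Dict.counter P) 0 ((PySem.Dict.counter P).size + 1)) []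
    (fun x => PySem.Dict.getD_counter P x) (mexInit_spec P)
  rw [hB]
  simp only [List.nil_append]
  -- both are the list of prefix MEXes, compared elementwise
  apply List.ext_getElem
  · simp [PySem.List.length_pyRange_one, hPlen]
  · intro i hi1 hi2
    have hi : i < n.toNat := by
      simpa [PySem.List.length_pyRange_one] using hi1
    have hgetA : ((PySem.List.pyRange 0 n 1).map
        (fun i => pvMexOf (xs.take (i + 1).toNat)))[i]'hi1
          = pvMexOf (xs.take ((0 + (i : Int)) + 1).toNat) := by
      rw [List.getElem_map, PySem.List.getElem_pyRange_one]
    have hcast : ((0 + (i : Int)) + 1).toNat = i + 1 := by omega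
    rw [hgetA, hcast, List.getElem_reverse, List.getElem_map, List.getElem_range]
    have hlm : ((List.range P.length).map
        (fun j => pvMexOf (P.take (P.length - j)))).length = n.toNat := by
      simp [hPlen]
    have hidx : P.length - (((List.range P.length).map
        (fun j => pvMexOf (P.take (P.length - j)))).length - 1 - i) = i + 1 := by
      rw [hlm, hPlen]; omega
    rw [hidx]
    have htt : P.take (i + 1) = xs.take (i + 1) := by
      rw [hP, List.take_take]
      congr 1
      omega
    rw [htt]
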